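-- pv_equiv track=rewrite | github.com/guptaanshik1/DSA-python | recursion/evenOdd.py | helper
-- ===== SOURCE A (Python) =====
-- def helper(arr, idx, resEven, resOdd):
--     if idx >= len(arr):
--         return resEven + resOdd
--     if arr[idx] % 2 == 0:
--         resEven.append(arr[idx])
--     elif arr[idx] % 2 != 0:
--         resOdd.append(arr[idx])
--     return helper(arr, idx + 1, resEven, resOdd)
-- ===== SOURCE B (Python) =====
-- def helper(arr, idx, resEven, resOdd):
--     tail = arr[idx:]
--     resEven.extend(x for x in tail if x % 2 == 0)
--     resOdd.extend(x for x in tail if x % 2 != 0)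
--     return resEven + resOdd
-- ===== Notes on version B (the rewrite author's own statement) =====
-- stated objective: simpler
-- what changed: Replaces index-by-index tail recursion with accumulator threading by one slice arr[idx:] and two filter passes appended in a single expression.
-- intended difference: For -len(arr) <= idx < 0, A's negative-index wraparound processes the last |idx| elements and then the whole array again, returning a partition with duplicated elements, while B partitions just the suffix arr[idx:], which is the intended 'process from position idx' behaviour. — e.g. on helper([1, 2, 3], -2, [], []): A returns [2, 2, 3, 1, 3], B returns [2, 3]
import Mathlib
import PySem

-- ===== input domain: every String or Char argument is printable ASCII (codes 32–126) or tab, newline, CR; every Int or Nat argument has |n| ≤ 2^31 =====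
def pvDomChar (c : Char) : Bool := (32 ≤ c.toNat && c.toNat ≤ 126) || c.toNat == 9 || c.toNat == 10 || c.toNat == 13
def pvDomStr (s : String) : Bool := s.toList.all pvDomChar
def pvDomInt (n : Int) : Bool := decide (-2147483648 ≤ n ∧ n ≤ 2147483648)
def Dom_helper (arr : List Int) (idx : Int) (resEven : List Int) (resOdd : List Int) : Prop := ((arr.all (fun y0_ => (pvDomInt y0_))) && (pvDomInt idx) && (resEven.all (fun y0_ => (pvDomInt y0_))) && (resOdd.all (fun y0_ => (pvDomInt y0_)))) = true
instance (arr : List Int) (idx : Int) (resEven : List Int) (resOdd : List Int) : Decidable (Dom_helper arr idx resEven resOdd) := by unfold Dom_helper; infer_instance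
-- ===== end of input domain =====

-- B replaces A's index tail recursion by one slice arr[idx:] plus two filter passes
-- (simpler decomposition, same O(n) cost); equivalence is about the RETURN value only
-- (both Pythons also append to resEven/resOdd in place).


-- ===== PORT A =====
def helper (arr : List Int) (idx : Int) (resEven : List Int) (resOdd : List Int) : List Int :=
  if _h : idx ≥ (arr.length : Int) then resEven ++ resOdd
  else
    match PySem.List.pyGet? arr idx with
    | none => resEven ++ resOdd  -- IndexError in Python; excluded by Pre_helper
    | some x =>
      if PySem.Int.mod x 2 = 0 then helper arr (idx + 1) (resEven ++ [x]) resOdd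
      else if PySem.Int.mod x 2 ≠ 0 then helper arr (idx + 1) resEven (resOdd ++ [x])
      else helper arr (idx + 1) resEven resOdd
termination_by ((arr.length : Int) - idx).toNat
decreasing_by all_goals omega

-- ===== PORT B =====
def helper_alt (arr : List Int) (idx : Int) (resEven : List Int) (resOdd : List Int) : List Int :=
  let tail := PySem.List.slice arr (some idx) none
  (resEven ++ tail.filter (fun x => PySem.Int.mod x 2 = 0)) ++
    (resOdd ++ tail.filter (fun x => PySem.Int.mod x 2 ≠ 0))

-- ===== PRECONDITION & SPEC =====
-- Pre_ excludes exactly the inputs where A raises IndexError: idx < -len(arr).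
def Pre_helper (arr : List Int) (idx : Int) (resEven : List Int) (resOdd : List Int) : Prop :=
  -(arr.length : Int) ≤ idx
instance (arr : List Int) (idx : Int) (resEven : List Int) (resOdd : List Int) : Decidable (Pre_helper arr idx resEven resOdd) := by unfold Pre_helper; infer_instance
def pvWitness_helper : List Int × Int × List Int × List Int := ([1, 2, 3], 0, [], [])

-- For -len(arr) ≤ idx < 0, A's negative-index wraparound processes the last |idx| elements and
-- then the whole array again, returning a partition with duplicated elements, while B partitions
-- just the suffix arr[idx:], which is the intended 'process from position idx' behaviour.
def D_helper (arr : List Int) (idx : Int) (resEven : List Int) (resOdd : List Int) : Prop :=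
  -(arr.length : Int) ≤ idx ∧ idx < 0
instance (arr : List Int) (idx : Int) (resEven : List Int) (resOdd : List Int) : Decidable (D_helper arr idx resEven resOdd) := by unfold D_helper; infer_instance

def Spec_helper (arr : List Int) (idx : Int) (resEven : List Int) (resOdd : List Int) (out : List Int) : Prop := ¬ D_helper arr idx resEven resOdd → out = helper_alt arr idx resEven resOdd
instance (arr : List Int) (idx : Int) (resEven : List Int) (resOdd : List Int) (out : List Int) : Decidable (Spec_helper arr idx resEven resOdd out) := by unfold Spec_helper; infer_instance

def pvDiffWitness_helper : List Int × Int × List Int × List Int := ([1, 2, 3], -2, [], [])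
def pvDiffWitnessOut_helper : (List Int) × (List Int) := ([2, 2, 3, 1, 3], [2, 3])

-- ===== CLAIM (what is proved, stated in full; the proofs are below) =====
def Claim_unchanged_helper : Prop := ∀ (arr : List Int) (idx : Int) (resEven : List Int) (resOdd : List Int), Dom_helper arr idx resEven resOdd → Pre_helper arr idx resEven resOdd → Spec_helper arr idx resEven resOdd (helper arr idx resEven resOdd)
def Claim_changed_helper : Prop := Dom_helper (pvDiffWitness_helper.1) (pvDiffWitness_helper.2.1) (pvDiffWitness_helper.2.2.1) (pvDiffWitness_helper.2.2.2) ∧ Pre_helper (pvDiffWitness_helper.1) (pvDiffWitness_helper.2.1) (pvDiffWitness_helper.2.2.1) (pvDiffWitness_helper.2.2.2) ∧ D_helper (pvDiffWitness_helper.1) (pvDiffWitness_helper.2.1) (pvDiffWitness_helper.2.2.1) (pvDiffWitness_helper.2.2.2) ∧ helper (pvDiffWitness_helper.1) (pvDiffWitness_helper.2.1) (pvDiffWitness_helper.2.2.1) (pvDiffWitness_helper.2.2.2) = pvDiffWitnessOut_helper.1 ∧ helper_alt (pvDiffWitness_helper.1) (pvDiffWitness_helper.2.1) (pvDiffWitness_helper.2.2.1)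 (pvDiffWitness_helper.2.2.2) = pvDiffWitnessOut_helper.2 ∧ pvDiffWitnessOut_helper.1 ≠ pvDiffWitnessOut_helper.2
def Claim_exact_helper : Prop := ∀ (arr : List Int) (idx : Int) (resEven : List Int) (resOdd : List Int), Dom_helper arr idx resEven resOdd → Pre_helper arr idx resEven resOdd → D_helper arr idx resEven resOdd → helper arr idx resEven resOdd ≠ helper_alt arr idx resEven resOdd

-- ===== LEMMAS AND PROOFS =====

-- A on a nonnegative index partitions the suffix arr.drop j behind the accumulators.
theorem helper_drop (arr : List Int) (j : Nat) (e o : List Int) :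
    helper arr (j : Int) e o =
      (e ++ (arr.drop j).filter (fun x => PySem.Int.mod x 2 = 0)) ++
        (o ++ (arr.drop j).filter (fun x => PySem.Int.mod x 2 ≠ 0)) := by
  rw [helper]
  by_cases hj : arr.length ≤ j
  · rw [dif_pos (by exact_mod_cast hj)]
    rw [List.drop_of_length_le hj]
    simp
  · push Not at hj
    rw [dif_neg (by push_cast; omega)]
    rw [PySem.List.pyGet?_natCast, List.getElem?_eq_getElem hj]
    dsimp only
    have hdrop : arr.drop j = arr[j] :: arr.drop (j + 1) := List.drop_eq_getElem_cons hj
    have hstep : (j : Int) + 1 = ((j + 1 : Nat) : Int) := by omega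
    by_cases hm : PySem.Int.mod arr[j] 2 = 0
    · rw [if_pos hm, hstep, helper_drop arr (j + 1) (e ++ [arr[j]]) o, hdrop]
      generalize List.drop (j + 1) arr = rest
      have h2 : arr[j] % 2 = 0 := by
        have := hm; rwa [PySem.Int.mod_eq_emod_of_pos (by norm_num)] at this
      have hd : 2 ∣ arr[j] := by omega
      have hne : ¬(arr[j] % 2 = 1) := by omega
      simp [hd, hne]
    · rw [if_neg hm, if_pos hm, hstep, helper_drop arr (j + 1) e (o ++ [arr[j]]), hdrop]
      generalize List.drop (j + 1) arr = rest
      have h2 : ¬(arr[j] % 2 = 0) := by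
        have := hm; rwa [PySem.Int.mod_eq_emod_of_pos (by norm_num)] at this
      have hd : ¬(2 ∣ arr[j]) := by omega
      have h1 : arr[j] % 2 = 1 := by omega
      simp [hd, h1]
termination_by arr.length - j
decreasing_by all_goals omega

-- length of A's result for any in-range start index
theorem helper_length (arr : List Int) (idx : Int) (e o : List Int)
    (h : -(arr.length : Int) ≤ idx) :
    (helper arr idx e o).length = e.length + o.length + ((arr.length : Int) - idx).toNat := by
  rw [helper]
  by_cases hj : (arr.length : Int) ≤ idx
  · rw [dif_pos hj]
    simp
    omega
  · push Not at hj
    rw [dif_neg (by omega)]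
    have hrange : PySem.Raise.InRange arr.length idx := by
      unfold PySem.Raise.InRange
      omega
    obtain ⟨x, hx⟩ : ∃ x, PySem.List.pyGet? arr idx = some x := by
      cases hget : PySem.List.pyGet? arr idx with
      | none => exact absurd hrange (((PySem.List.pyGet?_eq_none_iff arr idx).mp hget))
      | some x => exact ⟨x, rfl⟩
    rw [hx]
    dsimp only
    have h1 : -(arr.length : Int) ≤ idx + 1 := by omega
    by_cases hm : PySem.Int.mod x 2 = 0
    · rw [if_pos hm, helper_length arr (idx + 1) (e ++ [x]) o h1]
      simp
      omega
    · rw [if_neg hm, if_pos hm, helper_length arr (idx + 1) e (o ++ [x]) h1]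
      simp
      omega
termination_by ((arr.length : Int) - idx).toNat
decreasing_by all_goals (simp_wf; omega)

theorem filter_split_length (l : List Int) :
    (l.filter (fun x => PySem.Int.mod x 2 = 0)).length +
      (l.filter (fun x => PySem.Int.mod x 2 ≠ 0)).length = l.length := by
  induction l with
  | nil => simp
  | cons x xs ih =>
    by_cases h2 : (2 : Int) ∣ x
    · have h1 : ¬(x % 2 = 1) := by omega
      simp [h2, h1] at ih ⊢
      omega
    · have h1 : x % 2 = 1 := by omega
      simp [h2, h1] at ih ⊢
      omega

-- ===== VERDICT (by name: the statement is the Claim_ definition above) =====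
theorem helper_spec : Claim_unchanged_helper := by
  intro arr idx e o _hd hpre hnd
  unfold Pre_helper at hpre
  unfold D_helper at hnd
  have h0 : 0 ≤ idx := by omega
  obtain ⟨j, rfl⟩ : ∃ j : Nat, idx = (j : Int) := ⟨idx.toNat, (Int.toNat_of_nonneg h0).symm⟩
  unfold helper_alt
  rw [PySem.List.slice_from arr h0, helper_drop]
  simp

theorem helper_changed : Claim_changed_helper := by
  unfold Claim_changed_helper
  refine ⟨by decide, by decide, by decide, ?_, by decide, by decide⟩
  simp [pvDiffWitness_helper, pvDiffWitnessOut_helper, helper, PySem.List.pyGet?, PySem.List.pyIdx?, PySem.Int.mod]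

theorem helper_tight : Claim_exact_helper := by
  intro arr idx e o _hd hpre hD heq
  unfold Pre_helper at hpre
  unfold D_helper at hD
  have hlenA := helper_length arr idx e o hpre
  have hB : (helper_alt arr idx e o).length ≤ e.length + o.length + arr.length := by
    unfold helper_alt
    rw [PySem.List.slice_some_none]
    simp only [List.length_append]
    have := filter_split_length (arr.drop (PySem.List.clampIdx arr.length idx))
    have hd : (arr.drop (PySem.List.clampIdx arr.length idx)).length ≤ arr.length := by
      simp
    omega
  have := congrArg List.length heq
  omega
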